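-- pv_equiv track=rewrite | github.com/thierryxdp/TCC | problems/817/solution_296951.py | acima_da_media
-- ===== SOURCE A (Python) =====
-- def acima_da_media(lista):
--     media = sum(lista) // len(lista)
--     lista1 = []
--     for nota in lista:
--         if(nota > media):
--         	lista1 = lista1 + [nota]
--     lista1.sort()
--     return lista1
-- ===== SOURCE B (Python) =====
-- def acima_da_media(lista):
--     media = sum(lista) // len(lista)
--     s = sorted(lista)
--     # hand-written bisect_right: first index whose element exceeds media
--     lo, hi = 0, len(s)
--     while lo < hi:
--         mid = (lo + hi) // 2
--         if s[mid] <= media: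
--             lo = mid + 1
--         else:
--             hi = mid
--     return s[lo:]
-- ===== Notes on version B (the rewrite author's own statement) =====
-- stated objective: alternative
-- what changed: Instead of filtering every element against the mean and then sorting the survivors, B sorts the whole list once and binary-searches for the boundary past the mean, returning the tail slice.
import Mathlib
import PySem

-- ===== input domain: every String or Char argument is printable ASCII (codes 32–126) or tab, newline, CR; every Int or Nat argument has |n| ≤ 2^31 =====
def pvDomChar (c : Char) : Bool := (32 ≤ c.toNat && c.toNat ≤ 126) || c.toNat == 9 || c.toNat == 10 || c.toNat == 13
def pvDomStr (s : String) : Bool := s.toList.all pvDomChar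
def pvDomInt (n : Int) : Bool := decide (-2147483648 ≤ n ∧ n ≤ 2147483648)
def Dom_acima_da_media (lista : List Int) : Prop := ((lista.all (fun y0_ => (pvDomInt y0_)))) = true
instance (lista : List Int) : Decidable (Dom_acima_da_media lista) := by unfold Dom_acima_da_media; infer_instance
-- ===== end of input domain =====

-- B replaces A's filter-then-sort by one sort + a hand-written binary search for the boundary past the mean + a tail slice (alternative decomposition, same cost).
-- ===== PORT A =====
def acima_da_media (lista : List Int) : List Int :=
  let media := PySem.Int.floordiv lista.sum lista.length
  let lista1 := lista.foldl (fun acc nota => if nota > media then acc ++ [nota] else acc) []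
  PySem.List.sorted lista1 (fun x => x) false

-- ===== PORT B =====
-- the hand-written bisect_right while-loop of Source B ('mid' is inlined); s[mid] is in range
-- whenever 0 ≤ lo < hi ≤ len s, so the '.getD 0' default is never taken on reachable states.
-- the loop is made total by a fuel argument (= list length, enough since hi - lo shrinks
-- each iteration); with fuel exhausted it returns lo, which is never reached from the call site.
def pvBsearch (s : List Int) (media : Int) (fuel : Nat) (lo hi : Int) : Int :=
  match fuel with
  | 0 => lo
  | Nat.succ f =>
    if lo < hi then
      if (PySem.List.pyGet? s (PySem.Int.floordiv (lo + hi) 2)).getD 0 ≤ media then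
        pvBsearch s media f (PySem.Int.floordiv (lo + hi) 2 + 1) hi
      else
        pvBsearch s media f lo (PySem.Int.floordiv (lo + hi) 2)
    else lo

def acima_da_media_alt (lista : List Int) : List Int :=
  let media := PySem.Int.floordiv lista.sum lista.length
  let s := PySem.List.sorted lista (fun x => x) false
  let lo := pvBsearch s media s.length 0 (s.length : Int)
  PySem.List.slice s (some lo) none

-- ===== PRECONDITION & SPEC =====
-- Pre_ excludes only the empty list, on which both A and B raise ZeroDivisionError (len(lista) == 0).
def Pre_acima_da_media (lista : List Int) : Prop := lista ≠ []
instance (lista : List Int) : Decidable (Pre_acima_da_media lista) := by unfold Pre_acima_da_media; infer_instance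
def pvWitness_acima_da_media : List Int := [3, 1, 2]

def Spec_acima_da_media (lista : List Int) (out : List Int) : Prop := out = acima_da_media_alt lista
instance (lista : List Int) (out : List Int) : Decidable (Spec_acima_da_media lista out) := by unfold Spec_acima_da_media; infer_instance

-- ===== CLAIM (what is proved, stated in full; the proofs are below) =====
def Claim_equal_acima_da_media : Prop := ∀ (lista : List Int), Dom_acima_da_media lista → Pre_acima_da_media lista → Spec_acima_da_media lista (acima_da_media lista)

-- ===== LEMMAS AND PROOFS =====

theorem pvBsearch_zero (s : List Int) (media lo hi : Int) :
    pvBsearch s media 0 lo hi = lo := rfl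

theorem pvBsearch_succ (s : List Int) (media : Int) (f : Nat) (lo hi : Int) :
    pvBsearch s media (f + 1) lo hi =
      if lo < hi then
        if (PySem.List.pyGet? s (PySem.Int.floordiv (lo + hi) 2)).getD 0 ≤ media then
          pvBsearch s media f (PySem.Int.floordiv (lo + hi) 2 + 1) hi
        else
          pvBsearch s media f lo (PySem.Int.floordiv (lo + hi) 2)
      else lo := rfl

-- on a sorted list the binary search returns an index r splitting s into ≤ media / > media
theorem pvBsearch_spec (s : List Int) (media : Int) (hpair : s.Pairwise (· ≤ ·)) :
    ∀ n : Nat, ∀ lo hi : Int, (hi - lo).toNat ≤ n → 0 ≤ lo → lo ≤ hi → hi ≤ (s.length : Int) →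
    (∀ i : Nat, (i : Int) < lo → (h : i < s.length) → s[i] ≤ media) →
    (∀ i : Nat, hi ≤ (i : Int) → (h : i < s.length) → media < s[i]) →
    ∃ r : Nat, pvBsearch s media n lo hi = (r : Int) ∧ r ≤ s.length ∧
      (∀ i : Nat, i < r → (h : i < s.length) → s[i] ≤ media) ∧
      (∀ i : Nat, r ≤ i → (h : i < s.length) → media < s[i]) := by
  have hmono : ∀ (i j : Nat) (hj : j < s.length) (hij : i ≤ j),
      s[i]'(Nat.lt_of_le_of_lt hij hj) ≤ s[j] := by
    intro i j hj hij
    rcases Nat.eq_or_lt_of_le hij with rfl | hlt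
    · exact le_refl _
    · exact (List.pairwise_iff_getElem.mp hpair) i j (by omega) hj hlt
  intro n
  induction n with
  | zero =>
    intro lo hi hn h0 hlh hhi hb ha
    refine ⟨lo.toNat, by rw [pvBsearch_zero]; omega, by omega,
      fun i hi1 h => hb i (by omega) h,
      fun i hi1 h => ha i (by omega) h⟩
  | succ n ih =>
    intro lo hi hn h0 hlh hhi hb ha
    by_cases hlt : lo < hi
    · rw [pvBsearch_succ, if_pos hlt]
      have hfd := PySem.Int.floordiv_eq_ediv_of_pos (a := lo + hi) (b := 2) (by norm_num)
      set mid := PySem.Int.floordiv (lo + hi) 2 with hmid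
      have hm1 : lo ≤ mid := by omega
      have hm2 : mid < hi := by omega
      have hmlen : mid.toNat < s.length := by omega
      have hmr : PySem.List.pyGet? s mid = some (s[mid.toNat]'hmlen) :=
        PySem.List.pyGet?_eq_some_getElem s (by omega) (by omega)
      rw [hmr]
      simp only [Option.getD_some]
      by_cases hc : s[mid.toNat]'hmlen ≤ media
      · rw [if_pos hc]
        refine ih (mid + 1) hi (by omega) (by omega) (by omega) hhi ?_ ha
        intro i hi1 h
        by_cases hil : (i : Int) < lo
        · exact hb i hil h
        · have : i ≤ mid.toNat := by omega
          exact le_trans (hmono i mid.toNat hmlen this) hc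
      · rw [if_neg hc]
        refine ih lo mid (by omega) h0 (by omega) (by omega) hb ?_
        intro i hi1 h
        by_cases hih : hi ≤ (i : Int)
        · exact ha i hih h
        · have : mid.toNat ≤ i := by omega
          exact lt_of_lt_of_le (by omega) (hmono mid.toNat i h this)
    · refine ⟨lo.toNat, by rw [pvBsearch_succ, if_neg hlt]; omega, by omega,
        fun i hi1 h => hb i (by omega) h,
        fun i hi1 h => ha i (by omega) h⟩

-- a sorted list split at the boundary: the filter is exactly the tail
theorem filter_sorted_eq_drop (s : List Int) (media : Int) (r : Nat) (hr : r ≤ s.length)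
    (hb : ∀ i : Nat, i < r → (h : i < s.length) → s[i] ≤ media)
    (ha : ∀ i : Nat, r ≤ i → (h : i < s.length) → media < s[i]) :
    s.filter (fun x => decide (media < x)) = s.drop r := by
  have h1 : (s.take r).filter (fun x => decide (media < x)) = [] := by
    rw [List.filter_eq_nil_iff]
    intro a hamem
    obtain ⟨i, hi, hieq⟩ := List.getElem_of_mem hamem
    have hilen : i < s.length := by
      have := List.length_take_le r s; omega
    rw [List.getElem_take] at hieq
    have : a ≤ media := hieq ▸ hb i (by simp at hi; omega) hilen
    simp; omega
  have h2 : (s.drop r).filter (fun x => decide (media < x)) = s.drop r := by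
    rw [List.filter_eq_self]
    intro a hamem
    obtain ⟨i, hi, hieq⟩ := List.getElem_of_mem hamem
    have hilen : r + i < s.length := by simp at hi; omega
    rw [List.getElem_drop] at hieq
    have : media < a := hieq ▸ ha (r + i) (by omega) hilen
    simp; omega
  conv_lhs => rw [← List.take_append_drop r s]
  rw [List.filter_append, h1, h2, List.nil_append]

-- sorting commutes with filtering
theorem sorted_filter_comm (l : List Int) (media : Int) :
    PySem.List.sorted (l.filter (fun x => decide (media < x))) (fun x => x) false
      = (PySem.List.sorted l (fun x => x) false).filter (fun x => decide (media < x)) := by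
  apply PySem.List.sorted_id_eq_of_perm_of_pairwise
  · exact (PySem.List.sorted_perm l (fun x => x) false).filter _
  · exact (PySem.List.sorted_pairwise l (fun x => x)).filter _

-- ===== VERDICT (by name: the statement is the Claim_ definition above) =====
theorem acima_da_media_spec : Claim_equal_acima_da_media := by
  intro lista _hdom _hpre
  unfold Spec_acima_da_media acima_da_media acima_da_media_alt
  simp only []
  set media := PySem.Int.floordiv lista.sum lista.length with hmedia
  set s := PySem.List.sorted lista (fun x => x) false with hs
  have hpair : s.Pairwise (· ≤ ·) := PySem.List.sorted_pairwise lista (fun x => x)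
  obtain ⟨r, hr, hrle, hb, ha⟩ :=
    pvBsearch_spec s media hpair s.length 0 (s.length : Int) (by omega) (by omega)
      (by omega) (by omega)
      (fun i hi1 _ => absurd hi1 (by omega))
      (fun i hi1 h => absurd hi1 (by omega))
  rw [hr, PySem.List.slice_from s (by omega), Int.toNat_natCast]
  have hA : lista.foldl (fun acc nota => if nota > media then acc ++ [nota] else acc) []
      = lista.filter (fun x => decide (media < x)) := by
    simpa using PySem.List.foldl_append_ite_eq_filter (fun x => media < x) lista []
  rw [hA, sorted_filter_comm, ← hs]
  exact filter_sorted_eq_drop s media r hrle hb ha
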